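-- pv_equiv track=rewrite | github.com/davidlee/spec-driver | supekku/scripts/lib/backlog/priority.py | build_partitions
-- ===== SOURCE A (Python) =====
-- from typing import TypeVar
--
-- T = TypeVar('T')
--
-- def build_partitions(
--   all_items: list[T],
--   filtered_items: set[T]
-- ) -> tuple[list[T], list[tuple[T, list[T]]]]:
--   """Partition items into (shown, [unshown_followers]) pairs.
--
--   The partition structure preserves the relationship between filtered (shown)
--   items and their unshown followers. This enables smart merging where
--   reordering shown items causes their tails to move atomically.
--
--   Args:
--     all_items: Complete ordered list of items
--     filtered_items: Set of items that are visible/shown after filtering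
--
--   Returns:
--     Tuple of (prefix, partitions) where:
--       - prefix: Items before the first shown item
--       - partitions: List of (head, [tail_items]) pairs
--         - head: A shown item (or None for trailing unshown items)
--         - tail_items: Unshown items that follow this head
--
--   Example:
--     all_items = ['a', 'b', 'c', 'd', 'e']
--     filtered_items = {'b', 'd'}
--     => prefix=['a'], partitions=[('b', ['c']), ('d', ['e'])]
--   """
--   prefix: list[T] = []
--   partitions: list[tuple[T, list[T]]] = []
--   current_tail: list[T] = []
--   seen_first_shown = False
--
--   for item in all_items:
--     if item in filtered_items:
--       if not seen_first_shown:
--         # First shown item - current_tail is actually the prefix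
--         prefix = current_tail.copy()
--         current_tail = []
--         seen_first_shown = True
--       else:
--         # Subsequent shown item - attach current_tail to previous partition
--         if partitions:
--           last_head, _ = partitions[-1]
--           partitions[-1] = (last_head, current_tail)
--         current_tail = []
--       # Add this shown item with empty tail (will be filled next iteration)
--       partitions.append((item, []))
--     else:
--       current_tail.append(item)
--
--   # Attach any remaining tail to the last partition
--   if current_tail and partitions:
--     last_head, _ = partitions[-1]
--     partitions[-1] = (last_head, current_tail)
--   elif current_tail and not seen_first_shown:
--     # No shown items at all - everything is prefix
--     prefix = current_tail
--
--   return prefix, partitions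
-- ===== SOURCE B (Python) =====
-- def build_partitions(all_items, filtered_items):
--   """Span-based grouping: take the unshown run as prefix, then repeatedly
--   take a shown head and its following unshown run as one partition."""
--   def span(i):
--     j = i
--     while j < len(all_items) and all_items[j] not in filtered_items:
--       j += 1
--     return all_items[i:j], j
--
--   prefix, i = span(0)
--   partitions = []
--   while i < len(all_items):
--     head = all_items[i]
--     tail, i = span(i + 1)
--     partitions.append((head, tail))
--   return prefix, partitions
-- ===== Notes on version B (the rewrite author's own statement) =====
-- stated objective: simpler
-- what changed: Replaces A's single-pass state machine (seen_first_shown flag, retroactive rewrite of the last partition's tail, end-of-loop fixups) by a direct span-based grouping: take the leading unshown run as the prefix, then repeatedly take a shown head plus its following unshown run as one partition.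
import Mathlib
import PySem

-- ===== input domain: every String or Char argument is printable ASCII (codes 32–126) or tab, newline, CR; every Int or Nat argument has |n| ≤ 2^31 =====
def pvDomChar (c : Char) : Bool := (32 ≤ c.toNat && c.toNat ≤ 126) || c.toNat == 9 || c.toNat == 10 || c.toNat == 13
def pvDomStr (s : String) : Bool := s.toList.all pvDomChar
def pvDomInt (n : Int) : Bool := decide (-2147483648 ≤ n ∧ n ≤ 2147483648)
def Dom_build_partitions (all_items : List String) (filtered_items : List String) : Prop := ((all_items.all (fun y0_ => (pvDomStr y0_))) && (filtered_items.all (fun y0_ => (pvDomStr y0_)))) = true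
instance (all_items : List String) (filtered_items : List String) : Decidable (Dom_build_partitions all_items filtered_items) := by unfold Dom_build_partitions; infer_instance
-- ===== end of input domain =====

-- B replaces A's flag-and-retroactive-fixup state machine by a direct span-based grouping (objective: simpler).


-- ===== PORT A =====
-- partitions[-1] = (last_head, t) guarded by `if partitions:` — identity on the empty list
def pvSetLast (ps : List (String × List String)) (t : List String) : List (String × List String) :=
  match ps.getLast? with
  | none => ps
  | some (h, _) => ps.dropLast ++ [(h, t)]

-- loop body of A over state (prefix, partitions, current_tail, seen_first_shown)
def pvStepA (f : List String) (s : List String × List (String × List String) × List String × Bool)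
    (item : String) : List String × List (String × List String) × List String × Bool :=
  let (p, ps, t, seen) := s
  if f.contains item then
    if !seen then (t, ps ++ [(item, [])], [], true)
    else (p, pvSetLast ps t ++ [(item, [])], [], true)
  else (p, ps, t ++ [item], seen)

def build_partitions (all_items : List String) (filtered_items : List String) :
    List String × (List (String × List String)) :=
  let s := all_items.foldl (pvStepA filtered_items) ([], [], [], false)
  let (p, ps, t, seen) := s
  if t ≠ [] ∧ ps ≠ [] then (p, pvSetLast ps t)
  else if t ≠ [] ∧ seen = false then (t, ps)
  else (p, ps)

-- ===== PORT B =====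
-- span(i) of Source B: split off the longest run of unshown items
def pvSpan (f : List String) : List String → List String × List String
  | [] => ([], [])
  | x :: rest =>
    if f.contains x then ([], x :: rest)
    else
      let (a, b) := pvSpan f rest
      (x :: a, b)

theorem pvSpan_len (f : List String) (xs : List String) : (pvSpan f xs).2.length ≤ xs.length := by
  induction xs with
  | nil => simp [pvSpan]
  | cons x rest ih =>
    simp only [pvSpan]
    split
    · simp
    · simpa using Nat.le_succ_of_le ih

-- the while loop of Source B: repeatedly peel a shown head and its unshown run
def pvGroups (f : List String) : List String → List (String × List String)
  | [] => []
  | h :: rest =>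
    (h, (pvSpan f rest).1) :: pvGroups f (pvSpan f rest).2
termination_by xs => xs.length
decreasing_by
  simpa using Nat.lt_succ_of_le (pvSpan_len f rest)

def build_partitions_alt (all_items : List String) (filtered_items : List String) :
    List String × (List (String × List String)) :=
  let (pre, rest) := pvSpan filtered_items all_items
  (pre, pvGroups filtered_items rest)

-- ===== PRECONDITION & SPEC =====
def Spec_build_partitions (all_items : List String) (filtered_items : List String) (out : List String × (List (String × List String))) : Prop := out = build_partitions_alt all_items filtered_items
instance (all_items : List String) (filtered_items : List String) (out : List String × (List (String × List String))) : Decidable (Spec_build_partitions all_items filtered_items out) := by unfold Spec_build_partitions; infer_instance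

-- ===== CLAIM (what is proved, stated in full; the proofs are below) =====
def Claim_equal_build_partitions : Prop := ∀ (all_items : List String) (filtered_items : List String), Dom_build_partitions all_items filtered_items → Spec_build_partitions all_items filtered_items (build_partitions all_items filtered_items)

-- ===== LEMMAS AND PROOFS =====

-- finalize = the code after A's loop
def pvFinal (s : List String × List (String × List String) × List String × Bool) :
    List String × (List (String × List String)) :=
  let (p, ps, t, seen) := s
  if t ≠ [] ∧ ps ≠ [] then (p, pvSetLast ps t)
  else if t ≠ [] ∧ seen = false then (t, ps)
  else (p, ps)

theorem pvGroups_nil (f : List String) : pvGroups f [] = [] := by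
  rw [pvGroups.eq_def]

theorem pvGroups_cons (f : List String) (h : String) (rest : List String) :
    pvGroups f (h :: rest) = (h, (pvSpan f rest).1) :: pvGroups f (pvSpan f rest).2 := by
  rw [pvGroups.eq_def]

theorem pvSetLast_append (ps : List (String × List String)) (h : String) (u t : List String) :
    pvSetLast (ps ++ [(h, u)]) t = ps ++ [(h, t)] := by
  simp [pvSetLast]

-- A's loop from a post-first-shown state computes B's grouping of the remainder
theorem pvLoop_post (f : List String) (xs : List String) :
    ∀ (p t : List String) (ps : List (String × List String)) (h : String),
      pvFinal (xs.foldl (pvStepA f) (p, ps ++ [(h, [])], t, true))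
        = (p, ps ++ (h, t ++ (pvSpan f xs).1) :: pvGroups f (pvSpan f xs).2) := by
  induction xs with
  | nil =>
    intro p t ps h
    cases t with
    | nil => simp [pvFinal, pvSpan, pvGroups_nil]
    | cons a as =>
      simp [pvFinal, pvSpan, pvGroups_nil, pvSetLast_append]
  | cons x xs ih =>
    intro p t ps h
    by_cases hx : f.contains x = true
    all_goals first
      | (have hx' : x ∈ f := by simpa using hx)
      | (have hx' : x ∉ f := by simpa using hx)
    · have hstep : pvStepA f (p, ps ++ [(h, [])], t, true) x
          = (p, (ps ++ [(h, t)]) ++ [(x, [])], [], true) := by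
        simp [pvStepA, hx', pvSetLast_append]
      rw [List.foldl_cons, hstep, ih p [] (ps ++ [(h, t)]) x]
      have hsp : pvSpan f (x :: xs) = ([], x :: xs) := by simp [pvSpan, hx']
      rw [hsp, pvGroups_cons]
      simp
    · have hstep : pvStepA f (p, ps ++ [(h, [])], t, true) x
          = (p, ps ++ [(h, [])], t ++ [x], true) := by
        simp [pvStepA, hx']
      rw [List.foldl_cons, hstep, ih p (t ++ [x]) ps h]
      have hsp : pvSpan f (x :: xs) = (x :: (pvSpan f xs).1, (pvSpan f xs).2) := by
        simp [pvSpan, hx']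
      rw [hsp]
      simp

-- A's loop from the initial (pre-first-shown) state computes B's result
theorem pvLoop_pre (f : List String) (xs : List String) :
    ∀ (t : List String),
      pvFinal (xs.foldl (pvStepA f) (([] : List String), ([] : List (String × List String)), t, false))
        = (t ++ (pvSpan f xs).1, pvGroups f (pvSpan f xs).2) := by
  induction xs with
  | nil =>
    intro t
    cases t with
    | nil => simp [pvFinal, pvSpan, pvGroups_nil]
    | cons a as => simp [pvFinal, pvSpan, pvGroups_nil]
  | cons x xs ih =>
    intro t
    by_cases hx : f.contains x = true
    all_goals first
      | (have hx' : x ∈ f := by simpa using hx)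
      | (have hx' : x ∉ f := by simpa using hx)
    · have hstep : pvStepA f (([] : List String), ([] : List (String × List String)), t, false) x
          = (t, [] ++ [(x, [])], [], true) := by
        simp [pvStepA, hx']
      rw [List.foldl_cons, hstep, pvLoop_post f xs t [] ([] : List (String × List String)) x]
      have hsp : pvSpan f (x :: xs) = ([], x :: xs) := by simp [pvSpan, hx']
      rw [hsp, pvGroups_cons]
      simp
    · have hstep : pvStepA f (([] : List String), ([] : List (String × List String)), t, false) x
          = ([], [], t ++ [x], false) := by
        simp [pvStepA, hx']
      rw [List.foldl_cons, hstep, ih (t ++ [x])]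
      have hsp : pvSpan f (x :: xs) = (x :: (pvSpan f xs).1, (pvSpan f xs).2) := by
        simp [pvSpan, hx']
      rw [hsp]
      simp

-- ===== VERDICT (by name: the statement is the Claim_ definition above) =====
theorem build_partitions_spec : Claim_equal_build_partitions := by
  intro all_items filtered_items _
  unfold Spec_build_partitions build_partitions build_partitions_alt
  have := pvLoop_pre filtered_items all_items []
  simpa [pvFinal] using this
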